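-- pv_equiv track=rewrite | github.com/lifesci/advent_of_code | 2015/15/python/solution.py | p1_score_comb
-- ===== SOURCE A (Python) =====
-- from functools import reduce
--
-- def p1_score_comb(comb, ingredients):
--     total_vals = {}
--     for i in range(len(comb)):
--         num = comb[i]
--         for key in ingredients[i]:
--             if key == "calories":
--                 continue
--             total_vals.setdefault(key, 0)
--             total_vals[key] += ingredients[i][key] * num
--     for key in total_vals:
--         total_vals[key] = max(total_vals[key], 0)
--     return reduce(lambda acc, x: acc * x, total_vals.values(), 1)
-- ===== SOURCE B (Python) =====
-- def p1_score_comb(comb, ingredients):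
--     used = ingredients[:len(comb)]
--     keys = []
--     for ing in used:
--         for k in ing:
--             if k != "calories" and k not in keys:
--                 keys.append(k)
--     prod = 1
--     for k in keys:
--         prod *= max(sum(ing.get(k, 0) * num for num, ing in zip(comb, used)), 0)
--     return prod
-- ===== Notes on version B (the rewrite author's own statement) =====
-- stated objective: alternative
-- what changed: Inverts the loop nesting: instead of one ingredient-outer pass accumulating a dict of per-property totals that is then clamped and multiplied, B collects the property keys once and computes each key's clamped total by an independent scan over zip(comb, ingredients), multiplying as it goes.
import Mathlib
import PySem

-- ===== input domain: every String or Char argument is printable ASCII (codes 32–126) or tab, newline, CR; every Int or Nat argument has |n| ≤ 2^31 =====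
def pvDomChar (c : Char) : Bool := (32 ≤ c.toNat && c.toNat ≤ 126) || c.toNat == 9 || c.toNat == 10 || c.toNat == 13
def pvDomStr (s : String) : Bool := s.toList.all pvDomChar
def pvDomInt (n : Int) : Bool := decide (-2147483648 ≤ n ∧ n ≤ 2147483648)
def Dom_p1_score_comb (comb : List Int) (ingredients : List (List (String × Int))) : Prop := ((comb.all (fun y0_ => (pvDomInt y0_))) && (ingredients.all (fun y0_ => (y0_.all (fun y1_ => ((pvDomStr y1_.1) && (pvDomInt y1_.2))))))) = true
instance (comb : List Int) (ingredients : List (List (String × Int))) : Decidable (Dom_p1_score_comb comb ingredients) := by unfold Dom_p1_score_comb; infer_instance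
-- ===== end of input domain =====

-- B inverts the loop nesting: instead of one accumulating dict pass (ingredient-outer), it
-- collects the property keys once and computes each key's clamped total by an independent
-- scan over zip(comb, ingredients) (key-outer); objective: alternative decomposition.


-- ===== PORT A =====
def p1_score_comb (comb : List Int) (ingredients : List (List (String × Int))) : Int :=
  let total : PySem.Dict String Int :=
    (PySem.List.pyRange 0 (PySem.List.len comb) 1).foldl (fun d i =>
      let num := PySem.List.pyGetD comb i 0
      let ing := PySem.List.pyGetD ingredients i []
      -- 'for key in ingredients[i]' walks the dict's pairs; under Pre_ the keys of an
      -- ingredient are unique, so the lookup ingredients[i][key] is exactly the pair's value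
      ing.foldl (fun d kv =>
        if kv.1 = "calories" then d
        else
          let d1 := d.setdefault kv.1 0
          d1.insert kv.1 (d1.getD kv.1 0 + kv.2 * num)) d)
      PySem.Dict.empty
  let clamped := total.keys.foldl (fun d k => d.insert k (max (d.getD k 0) 0)) total
  clamped.values.foldl (fun acc x => acc * x) 1

-- ===== PORT B =====
def p1_score_comb_alt (comb : List Int) (ingredients : List (List (String × Int))) : Int :=
  let used := PySem.List.slice ingredients none (some (PySem.List.len comb))
  let keys := used.foldl (fun ks ing =>
      ing.foldl (fun ks kv =>
        if kv.1 ≠ "calories" ∧ kv.1 ∉ ks then ks ++ [kv.1] else ks) ks) ([] : List String)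
  keys.foldl (fun prod k =>
    prod * max ((comb.zip used).foldl
        (fun s p => s + (PySem.Dict.mk p.2).getD k 0 * p.1) 0) 0) 1

-- ===== PRECONDITION & SPEC =====
-- Pre_ excludes (a) inputs where A raises IndexError (more counts than ingredients), and
-- (b) inner lists with duplicate keys, which do not represent a Python dict (a dict's keys
-- are unique); on such lists the assoc-list reading of the two ports is ambiguous.
def Pre_p1_score_comb (comb : List Int) (ingredients : List (List (String × Int))) : Prop :=
  comb.length ≤ ingredients.length ∧ ∀ ing ∈ ingredients, (ing.map Prod.fst).Nodup
instance (comb : List Int) (ingredients : List (List (String × Int))) : Decidable (Pre_p1_score_comb comb ingredients) := by unfold Pre_p1_score_comb; infer_instance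
def pvWitness_p1_score_comb : List Int × (List (List (String × Int))) :=
  ([2, 3], [[("capacity", 1), ("calories", 5)], [("capacity", 2), ("flavor", -1)]])

def Spec_p1_score_comb (comb : List Int) (ingredients : List (List (String × Int))) (out : Int) : Prop := out = p1_score_comb_alt comb ingredients
instance (comb : List Int) (ingredients : List (List (String × Int))) (out : Int) : Decidable (Spec_p1_score_comb comb ingredients out) := by unfold Spec_p1_score_comb; infer_instance

-- ===== CLAIM (what is proved, stated in full; the proofs are below) =====
def Claim_equal_p1_score_comb : Prop := ∀ (comb : List Int) (ingredients : List (List (String × Int))), Dom_p1_score_comb comb ingredients → Pre_p1_score_comb comb ingredients → Spec_p1_score_comb comb ingredients (p1_score_comb comb ingredients)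

-- ===== LEMMAS AND PROOFS =====

-- A's dict-update step on one flattened (key, delta) pair (the inner body of A with
-- the multiplication already performed)
def pvStep (d : PySem.Dict String Int) (q : String × Int) : PySem.Dict String Int :=
  if q.1 = "calories" then d
  else
    let d1 := d.setdefault q.1 0
    d1.insert q.1 (d1.getD q.1 0 + q.2)

def pvDeltas (ps : List (Int × List (String × Int))) : List (String × Int) :=
  ps.flatMap (fun p => p.2.map (fun kv => (kv.1, kv.2 * p.1)))

def pvKeys (ks : List String) (l : List (String × Int)) : List String :=
  l.foldl (fun ks q => if q.1 ≠ "calories" ∧ q.1 ∉ ks then ks ++ [q.1] else ks) ks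

def pvSum (l : List (String × Int)) (k : String) : Int :=
  ((l.filter (fun q => q.1 = k)).map (·.2)).sum


theorem pvNodupSnoc (ks : List String) (a : String) (h : ks.Nodup) (hm : a ∉ ks) :
    (ks ++ [a]).Nodup := by
  simp only [List.nodup_append, List.nodup_singleton, true_and]
  refine ⟨h, ?_⟩
  intro x hx b hb he
  rw [List.mem_singleton] at hb
  subst hb
  exact hm (he ▸ hx)

theorem pvSum_nil (k : String) : pvSum [] k = 0 := rfl

theorem pvSum_cons (q : String × Int) (l : List (String × Int)) (k : String) :
    pvSum (q :: l) k = (if q.1 = k then q.2 else 0) + pvSum l k := by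
  by_cases h : q.1 = k <;> simp [pvSum, h]

theorem pvSum_append (l1 l2 : List (String × Int)) (k : String) :
    pvSum (l1 ++ l2) k = pvSum l1 k + pvSum l2 k := by
  simp [pvSum]

theorem mem_pvKeys (l : List (String × Int)) : ∀ (ks : List String) (k : String),
    k ∈ pvKeys ks l → k ∈ ks ∨ k ≠ "calories" := by
  induction l with
  | nil => intro ks k h; exact Or.inl h
  | cons q t ih =>
    intro ks k h
    simp only [pvKeys, List.foldl_cons] at h
    by_cases hq : q.1 ≠ "calories" ∧ q.1 ∉ ks
    · rw [if_pos hq] at h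
      rcases ih (ks ++ [q.1]) k h with hm | hm
      · rcases List.mem_append.mp hm with hm | hm
        · exact Or.inl hm
        · right; simpa using (List.mem_singleton.mp hm) ▸ hq.1
      · exact Or.inr hm
    · rw [if_neg hq] at h; exact ih ks k h

theorem nodup_pvKeys (l : List (String × Int)) : ∀ (ks : List String),
    ks.Nodup → (pvKeys ks l).Nodup := by
  induction l with
  | nil => intro ks h; exact h
  | cons q t ih =>
    intro ks h
    simp only [pvKeys, List.foldl_cons]
    by_cases hq : q.1 ≠ "calories" ∧ q.1 ∉ ks
    · rw [if_pos hq]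
      exact ih _ (pvNodupSnoc ks q.1 h hq.2)
    · rw [if_neg hq]; exact ih ks h

theorem pvKeys_cons (ks : List String) (q : String × Int) (t : List (String × Int)) :
    pvKeys ks (q :: t) =
      pvKeys (if q.1 ≠ "calories" ∧ q.1 ∉ ks then ks ++ [q.1] else ks) t := by
  simp only [pvKeys, List.foldl_cons]

-- the heart: one pass of A's accumulating dict, characterised over a flat delta list
theorem pvAccum_items (l : List (String × Int)) : ∀ (d : PySem.Dict String Int),
    d.keys.Nodup → "calories" ∉ d.keys →
    (l.foldl pvStep d).items = (pvKeys d.keys l).map (fun k => (k, d.getD k 0 + pvSum l k)) := by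
  induction l with
  | nil =>
    intro d hnd _
    simp [pvKeys, pvSum_nil, PySem.Dict.items_eq_map_keys d hnd 0]
  | cons q t ih =>
    intro d hnd hcal
    rw [List.foldl_cons, pvKeys_cons]
    by_cases hc : q.1 = "calories"
    · have hstep : pvStep d q = d := by simp [pvStep, hc]
      have hcond : ¬ (q.1 ≠ "calories" ∧ q.1 ∉ d.keys) := by simp [hc]
      rw [hstep, if_neg hcond, ih d hnd hcal]
      refine List.map_congr_left (fun k hk => ?_)
      simp only [Prod.mk.injEq, true_and]
      have hkc : k ≠ "calories" := by
        rcases mem_pvKeys t d.keys k hk with hm | hm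
        · exact fun he => hcal (he ▸ hm)
        · exact hm
      rw [pvSum_cons, if_neg (by rw [hc]; exact fun he => hkc (Eq.symm he))]
      ring_nf
    · by_cases hm : q.1 ∈ d.keys
      · have hct : d.contains q.1 = true := (PySem.Dict.contains_iff_mem_keys d q.1).mpr hm
        have hstep : pvStep d q = d.insert q.1 (d.getD q.1 0 + q.2) := by
          simp [pvStep, hc, PySem.Dict.setdefault_of_contains d 0 hct]
        have hcond : ¬ (q.1 ≠ "calories" ∧ q.1 ∉ d.keys) := by simp [hm]
        rw [hstep, if_neg hcond,
          ih _ (by rw [PySem.Dict.keys_insert_of_contains d _ hct]; exact hnd)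
            (by rw [PySem.Dict.keys_insert_of_contains d _ hct]; exact hcal),
          PySem.Dict.keys_insert_of_contains d _ hct]
        refine List.map_congr_left (fun k hk => ?_)
        simp only [Prod.mk.injEq, true_and]
        rw [PySem.Dict.getD_insert, pvSum_cons]
        by_cases hkq : k = q.1
        · rw [if_pos hkq, if_pos hkq.symm, hkq]; ring
        · rw [if_neg hkq, if_neg (fun he => hkq (Eq.symm he))]; ring_nf
      · have hcf : d.contains q.1 = false := by
          exact Bool.eq_false_iff.mpr
            (fun h => hm ((PySem.Dict.contains_iff_mem_keys d q.1).mp h))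
        have hstep : pvStep d q = d.insert q.1 (0 + q.2) := by
          simp only [pvStep, if_neg hc, PySem.Dict.setdefault_of_not_contains d 0 hcf,
            PySem.Dict.getD_insert_self, PySem.Dict.insert_insert_self]
        have hkeys : (d.insert q.1 (0 + q.2)).keys = d.keys ++ [q.1] :=
          PySem.Dict.keys_insert_of_not_contains d _ hcf
        have hcond : q.1 ≠ "calories" ∧ q.1 ∉ d.keys := ⟨hc, hm⟩
        have hnd2 : (d.insert q.1 (0 + q.2)).keys.Nodup := by
          rw [hkeys]; exact pvNodupSnoc d.keys q.1 hnd hm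
        have hcal2 : "calories" ∉ (d.insert q.1 (0 + q.2)).keys := by
          rw [hkeys]
          simp only [List.mem_append, List.mem_singleton]
          exact fun h => h.elim hcal (fun he => hc (Eq.symm he))
        rw [hstep, if_pos hcond, ih _ hnd2 hcal2, hkeys]
        refine List.map_congr_left (fun k hk => ?_)
        simp only [Prod.mk.injEq, true_and]
        rw [PySem.Dict.getD_insert, pvSum_cons]
        by_cases hkq : k = q.1
        · rw [if_pos hkq, if_pos hkq.symm, hkq,
            PySem.Dict.getD_of_not_contains d 0 hcf]
          ring
        · rw [if_neg hkq, if_neg (fun he => hkq (Eq.symm he))]; ring_nf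

-- A's clamping pass 'for key in total_vals: total_vals[key] = max(..., 0)'
theorem pvClamp_items (ks : List String) : ∀ (d : PySem.Dict String Int) (g : String → Int),
    d.keys.Nodup → ks.Nodup → (∀ k ∈ ks, k ∈ d.keys) → (∀ k ∈ ks, d.getD k 0 = g k) →
    (ks.foldl (fun d k => d.insert k (max (d.getD k 0) 0)) d).items
      = d.items.map (fun p => if p.1 ∈ ks then (p.1, max (g p.1) 0) else p) := by
  induction ks with
  | nil => intro d g _ _ _ _; simp
  | cons k0 t ih =>
    intro d g hnd hks hsub hval
    have hct : d.contains k0 = true :=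
      (PySem.Dict.contains_iff_mem_keys d k0).mpr (hsub k0 (by simp))
    have hk0t : k0 ∉ t := (List.nodup_cons.mp hks).1
    rw [List.foldl_cons]
    have hkeys1 : (d.insert k0 (max (d.getD k0 0) 0)).keys = d.keys :=
      PySem.Dict.keys_insert_of_contains d _ hct
    have hnd2 : (d.insert k0 (max (d.getD k0 0) 0)).keys.Nodup := by
      rw [hkeys1]; exact hnd
    have hsub2 : ∀ k ∈ t, k ∈ (d.insert k0 (max (d.getD k0 0) 0)).keys := by
      intro k hk; rw [hkeys1]; exact hsub k (by simp [hk])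
    have hval2 : ∀ k ∈ t, (d.insert k0 (max (d.getD k0 0) 0)).getD k 0 = g k := by
      intro k hk
      rw [PySem.Dict.getD_insert,
        if_neg (show ¬ k = k0 from fun he => hk0t (he ▸ hk))]
      exact hval k (by simp [hk])
    rw [ih (d.insert k0 (max (d.getD k0 0) 0)) g hnd2 (List.nodup_cons.mp hks).2 hsub2 hval2,
      PySem.Dict.items_insert_of_contains d _ hct, List.map_map]
    refine List.map_congr_left (fun p hp => ?_)
    simp only [Function.comp_apply]
    by_cases hpk : p.1 = k0
    · have hv : d.getD k0 0 = g k0 := hval k0 (by simp)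
      simp [hpk, hk0t, hv]
    · by_cases hpt : p.1 ∈ t
      · simp [hpk, hpt]
      · simp [hpk, hpt]

theorem pvFoldlFlatMap {α β δ : Type} (l : List α) (f : α → List β) (g : δ → β → δ) :
    ∀ (a : δ), (l.flatMap f).foldl g a = l.foldl (fun acc x => (f x).foldl g acc) a := by
  induction l with
  | nil => intro a; rfl
  | cons x t ih => intro a; simp only [List.flatMap_cons, List.foldl_append, List.foldl_cons, ih]

theorem pvZipTake {α β : Type} (xs : List α) : ∀ (ys : List β),
    xs.zip (ys.take xs.length) = xs.zip ys := by
  induction xs with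
  | nil => intro ys; simp
  | cons x t ih =>
    intro ys
    cases ys with
    | nil => simp
    | cons y ys => simp [List.zip_cons_cons, ih ys]

-- index loop 'for i in range(len(cs)): … cs[i] … gs[i] …' is a fold over zip cs gs
theorem pvIdxFold {δ : Type} (f : δ → Int → List (String × Int) → δ) :
    ∀ (cs : List Int) (gs : List (List (String × Int))) (d : δ), cs.length ≤ gs.length →
    (List.range cs.length).foldl (fun d k => f d (cs.getD k 0) (gs.getD k [])) d
      = (cs.zip gs).foldl (fun d p => f d p.1 p.2) d := by
  intro cs
  induction cs with
  | nil => intro gs d _; rfl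
  | cons c t ih =>
    intro gs d hlen
    cases gs with
    | nil => simp at hlen
    | cons g gs =>
      rw [List.length_cons, List.range_succ_eq_map, List.foldl_cons, List.foldl_map]
      simp only [List.getD_cons_zero, List.getD_cons_succ, List.zip_cons_cons, List.foldl_cons]
      exact ih gs (f d c g) (by simpa using hlen)

theorem pvPyFold {δ : Type} (f : δ → Int → List (String × Int) → δ)
    (cs : List Int) (gs : List (List (String × Int))) (d : δ) (hlen : cs.length ≤ gs.length) :
    (PySem.List.pyRange 0 (PySem.List.len cs) 1).foldl
        (fun d i => f d (PySem.List.pyGetD cs i 0) (PySem.List.pyGetD gs i [])) d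
      = (cs.zip gs).foldl (fun d p => f d p.1 p.2) d := by
  have hl : PySem.List.len cs = (cs.length : Int) := by simp [pysem]
  rw [hl, PySem.List.pyRange_zero_nat, List.foldl_map]
  simp only [PySem.List.pyGetD_natCast]
  exact pvIdxFold f cs gs d hlen

-- per-ingredient: the deltas contributed for key k sum to ing.get(k, 0) * n (unique keys)
theorem pvSum_map_ing (ing : List (String × Int)) : ∀ (n : Int) (k : String),
    (ing.map Prod.fst).Nodup →
    pvSum (ing.map (fun kv => (kv.1, kv.2 * n))) k = (PySem.Dict.mk ing).getD k 0 * n := by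
  induction ing with
  | nil =>
    intro n k _
    have h0 : (PySem.Dict.mk ([] : List (String × Int))).get? k = none := by
      rw [PySem.Dict.get?_eq_none_iff_not_mem_keys, PySem.Dict.keys_mk]
      simp
    simp [pvSum_nil, PySem.Dict.getD_eq_get?_getD, h0]
  | cons kv t ih =>
    intro n k hnd
    obtain ⟨k1, v1⟩ := kv
    have hnd' : (t.map Prod.fst).Nodup := (List.nodup_cons.mp (by simpa using hnd)).2
    have hkvt : k1 ∉ t.map Prod.fst := (List.nodup_cons.mp (by simpa using hnd)).1
    rw [List.map_cons, pvSum_cons, ih n k hnd']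
    simp only [PySem.Dict.getD_eq_get?_getD, PySem.Dict.get?_mk_cons]
    by_cases hk : k1 = k
    · have h0 : (PySem.Dict.mk t).get? k = none := by
        rw [PySem.Dict.get?_eq_none_iff_not_mem_keys, PySem.Dict.keys_mk]
        exact fun hmem => hkvt (hk ▸ hmem)
      simp [hk, h0]
    · simp [hk]

theorem pvSum_deltas (ps : List (Int × List (String × Int))) : ∀ (k : String),
    pvSum (pvDeltas ps) k
      = (ps.map (fun p => pvSum (p.2.map (fun kv => (kv.1, kv.2 * p.1))) k)).sum := by
  induction ps with
  | nil => intro k; simp [pvDeltas, pvSum_nil]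
  | cons p t ih =>
    intro k
    simp only [pvDeltas, List.flatMap_cons, List.map_cons, List.sum_cons] at *
    rw [pvSum_append, ih k]



def pvCanon (comb : List Int) (ings : List (List (String × Int))) : Int :=
  (pvKeys [] (pvDeltas (comb.zip ings))).foldl
    (fun a k => a * max (pvSum (pvDeltas (comb.zip ings)) k) 0) 1

theorem pvPyFoldA (comb : List Int) (ings : List (List (String × Int)))
    (hlen : comb.length ≤ ings.length) :
    (PySem.List.pyRange 0 (PySem.List.len comb) 1).foldl
      (fun d i =>
        (PySem.List.pyGetD ings i []).foldl
          (fun d kv =>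
            if kv.1 = "calories" then d
            else (d.setdefault kv.1 0).insert kv.1
              ((d.setdefault kv.1 0).getD kv.1 0 + kv.2 * PySem.List.pyGetD comb i 0)) d)
      PySem.Dict.empty
    = (comb.zip ings).foldl
        (fun d p => p.2.foldl (fun d kv => pvStep d (kv.1, kv.2 * p.1)) d)
        PySem.Dict.empty :=
  pvPyFold (fun (d : PySem.Dict String Int) (num : Int) (ing : List (String × Int)) =>
      ing.foldl (fun (d : PySem.Dict String Int) (kv : String × Int) =>
        pvStep d (kv.1, kv.2 * num)) d)
    comb ings PySem.Dict.empty hlen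

theorem pvKeys_deltas (qs : List (Int × List (String × Int))) (a : List String) :
    pvKeys a (pvDeltas qs)
      = qs.foldl (fun ks p => p.2.foldl (fun ks kv =>
          if kv.1 ≠ "calories" ∧ kv.1 ∉ ks then ks ++ [kv.1] else ks) ks) a := by
  rw [show pvKeys a (pvDeltas qs)
      = (qs.flatMap (fun p => p.2.map (fun kv => (kv.1, kv.2 * p.1)))).foldl
          (fun ks q => if q.1 ≠ "calories" ∧ q.1 ∉ ks then ks ++ [q.1] else ks) a from rfl,
    pvFoldlFlatMap]
  refine PySem.List.foldl_congr_mem _ _ _ _ ?_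
  intro acc p _
  rw [List.foldl_map]

theorem pvA_canon (comb : List Int) (ings : List (List (String × Int)))
    (hlen : comb.length ≤ ings.length) :
    p1_score_comb comb ings = pvCanon comb ings := by
  simp only [p1_score_comb]
  rw [pvPyFoldA comb ings hlen]
  have e2 : (comb.zip ings).foldl
        (fun d p => p.2.foldl (fun d kv => pvStep d (kv.1, kv.2 * p.1)) d)
        PySem.Dict.empty
      = (pvDeltas (comb.zip ings)).foldl pvStep PySem.Dict.empty := by
    rw [show pvDeltas (comb.zip ings)
        = (comb.zip ings).flatMap (fun p => p.2.map (fun kv => (kv.1, kv.2 * p.1))) from rfl,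
      pvFoldlFlatMap]
    refine PySem.List.foldl_congr_mem _ _ _ _ ?_
    intro acc p _
    rw [List.foldl_map]
  rw [e2]
  set T := (pvDeltas (comb.zip ings)).foldl pvStep PySem.Dict.empty with hT
  have hitems : T.items = (pvKeys [] (pvDeltas (comb.zip ings))).map
      (fun k => (k, pvSum (pvDeltas (comb.zip ings)) k)) := by
    have h := pvAccum_items (pvDeltas (comb.zip ings)) PySem.Dict.empty
      (by simp [PySem.Dict.keys_empty]) (by simp [PySem.Dict.keys_empty])
    simpa [PySem.Dict.keys_empty, PySem.Dict.getD_empty] using h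
  have hkeysT : T.keys = pvKeys [] (pvDeltas (comb.zip ings)) := by
    simp only [PySem.Dict.keys, hitems, List.map_map]
    exact List.map_id _
  have hndT : T.keys.Nodup := by
    rw [hkeysT]; exact nodup_pvKeys _ [] List.nodup_nil
  have hval : ∀ k ∈ T.keys, T.getD k 0 = pvSum (pvDeltas (comb.zip ings)) k := by
    intro k hk
    rw [hkeysT] at hk
    exact PySem.Dict.getD_of_mem_items T
      (by rw [hitems]; exact List.mem_map_of_mem hk) hndT 0
  have hclamp : (T.keys.foldl (fun d k => d.insert k (max (d.getD k 0) 0)) T).items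
      = (pvKeys [] (pvDeltas (comb.zip ings))).map
          (fun k => (k, max (pvSum (pvDeltas (comb.zip ings)) k) 0)) := by
    rw [pvClamp_items T.keys T (fun k => pvSum (pvDeltas (comb.zip ings)) k)
        hndT hndT (fun k hk => hk) hval,
      hitems, List.map_map]
    refine List.map_congr_left (fun k hk => ?_)
    simp only [Function.comp_apply]
    rw [if_pos (by rw [hkeysT]; exact hk)]
  simp only [PySem.Dict.values, hclamp, List.map_map, List.foldl_map]
  rfl

theorem pvB_canon (comb : List Int) (ings : List (List (String × Int)))
    (hnodup : ∀ ing ∈ ings, (ing.map Prod.fst).Nodup) :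
    p1_score_comb_alt comb ings = pvCanon comb ings := by
  have hused : PySem.List.slice ings none (some (PySem.List.len comb))
      = ings.take comb.length := by
    have hl : PySem.List.len comb = ((comb.length : Nat) : Int) := by simp [pysem]
    rw [hl, PySem.List.slice_to_natCast]
  have hzip : comb.zip (ings.take comb.length) = comb.zip ings := pvZipTake comb ings
  have hul : (ings.take comb.length).length ≤ comb.length := by
    simp [List.length_take]
  simp only [p1_score_comb_alt]
  rw [hused]
  have eK : (ings.take comb.length).foldl (fun ks ing =>
        ing.foldl (fun ks kv =>
          if kv.1 ≠ "calories" ∧ kv.1 ∉ ks then ks ++ [kv.1] else ks) ks) []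
      = pvKeys [] (pvDeltas (comb.zip ings)) := by
    have hsnd : (comb.zip (ings.take comb.length)).map Prod.snd = ings.take comb.length :=
      List.map_snd_zip hul
    calc (ings.take comb.length).foldl (fun ks ing =>
            ing.foldl (fun ks kv =>
              if kv.1 ≠ "calories" ∧ kv.1 ∉ ks then ks ++ [kv.1] else ks) ks) []
        = ((comb.zip (ings.take comb.length)).map Prod.snd).foldl (fun ks ing =>
            ing.foldl (fun ks kv =>
              if kv.1 ≠ "calories" ∧ kv.1 ∉ ks then ks ++ [kv.1] else ks) ks) [] := by
          rw [hsnd]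
      _ = (comb.zip (ings.take comb.length)).foldl (fun ks p =>
            p.2.foldl (fun ks kv =>
              if kv.1 ≠ "calories" ∧ kv.1 ∉ ks then ks ++ [kv.1] else ks) ks) [] :=
          List.foldl_map
      _ = (comb.zip ings).foldl (fun ks p =>
            p.2.foldl (fun ks kv =>
              if kv.1 ≠ "calories" ∧ kv.1 ∉ ks then ks ++ [kv.1] else ks) ks) [] := by
          rw [hzip]
      _ = pvKeys [] (pvDeltas (comb.zip ings)) := (pvKeys_deltas (comb.zip ings) []).symm
  rw [eK]
  have eS : ∀ k, (comb.zip (ings.take comb.length)).foldl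
        (fun s p => s + (PySem.Dict.mk p.2).getD k 0 * p.1) 0
      = pvSum (pvDeltas (comb.zip ings)) k := by
    intro k
    rw [hzip, PySem.List.foldl_add (comb.zip ings)
        (fun p => (PySem.Dict.mk p.2).getD k 0 * p.1) 0,
      pvSum_deltas (comb.zip ings) k, zero_add]
    refine congrArg List.sum (List.map_congr_left fun p hp => ?_)
    exact (pvSum_map_ing p.2 p.1 k
      (hnodup p.2 (List.of_mem_zip (show (p.1, p.2) ∈ comb.zip ings from by simpa using hp)).2)).symm
  unfold pvCanon
  refine PySem.List.foldl_congr_mem _ _ _ _ ?_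
  intro acc k _
  rw [eS k]

-- ===== VERDICT (by name: the statement is the Claim_ definition above) =====
theorem p1_score_comb_spec : Claim_equal_p1_score_comb := by
  intro comb ings _ hpre
  unfold Spec_p1_score_comb
  rw [pvA_canon comb ings hpre.1, pvB_canon comb ings hpre.2]
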